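-- pv_equiv track=rewrite | github.com/ibrahim-nazari/practice-algorithm | icpc2024/samBst.py | sameBst
-- ===== SOURCE A (Python) =====
-- def sameBst(nums1,nums2):
--     if not nums1 and not nums2:
--         return True
--     if len(nums1) !=len(nums2):
--         return False
--     root1=nums1[0]
--     root2=nums2[0]
--
--     if root1 !=root2:
--         return False
--     left1= [a for a in nums1[1:] if a <=root1]
--     right1= [a for a in nums1[1:] if a > root1]
--     left2= [a for a in nums2[1:] if a <=root2]
--     right2= [a for a in nums2[1:] if a > root2]
--     return sameBst(left1,left2) and sameBst(right1,right2)
-- ===== SOURCE B (Python) =====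
-- def sameBst(nums1, nums2):
--     # Build the BST each array produces by inserting its elements in order
--     # (x <= node goes left), then compare the two trees structurally.
--     def insert(t, x):
--         if t is None:
--             return (x, None, None)
--         v, l, r = t
--         if x <= v:
--             return (v, insert(l, x), r)
--         return (v, l, insert(r, x))
--
--     def build(xs):
--         t = None
--         for x in xs:
--             t = insert(t, x)
--         return t
--
--     return build(nums1) == build(nums2)
-- ===== Notes on version B (the rewrite author's own statement) =====
-- stated objective: alternative
-- what changed: B actually constructs the BST of each array by sequential insertion and compares the two trees structurally, instead of A's recursive partition of the lists into <=root / >root sublists at every level.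
import Mathlib
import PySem

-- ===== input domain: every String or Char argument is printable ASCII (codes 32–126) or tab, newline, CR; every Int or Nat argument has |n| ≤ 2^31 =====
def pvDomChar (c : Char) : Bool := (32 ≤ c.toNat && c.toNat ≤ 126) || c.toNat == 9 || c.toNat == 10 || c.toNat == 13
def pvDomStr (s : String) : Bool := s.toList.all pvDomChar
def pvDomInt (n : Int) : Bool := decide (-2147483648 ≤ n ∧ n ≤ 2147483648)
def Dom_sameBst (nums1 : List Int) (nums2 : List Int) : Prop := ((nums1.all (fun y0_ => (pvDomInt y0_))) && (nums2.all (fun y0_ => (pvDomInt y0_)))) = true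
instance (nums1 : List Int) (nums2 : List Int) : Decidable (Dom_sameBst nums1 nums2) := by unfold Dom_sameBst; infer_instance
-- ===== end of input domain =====

-- B builds the BST each array produces (by sequential insertion, <= goes left) and
-- compares the trees structurally, instead of A's recursive list partitioning. Objective: alternative.

-- ===== PORT A =====
def sameBst (nums1 : List Int) (nums2 : List Int) : Bool :=
  if nums1.isEmpty && nums2.isEmpty then true
  else if nums1.length ≠ nums2.length then false
  else
    match nums1, nums2 with
    | root1 :: rest1, root2 :: rest2 =>
      if root1 ≠ root2 then false
      else
        sameBst (rest1.filter (fun a => a ≤ root1)) (rest2.filter (fun a => a ≤ root2)) &&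
        sameBst (rest1.filter (fun a => root1 < a)) (rest2.filter (fun a => root2 < a))
    | _, _ => false   -- unreachable: lengths equal and not both empty
termination_by nums1.length
decreasing_by
  all_goals
    simp only [List.length_unattach, List.length_cons]
    exact Nat.lt_succ_of_le (le_of_le_of_eq (List.length_filter_le _ _) List.length_attach)

-- ===== PORT B =====
inductive BTree where
  | leaf : BTree
  | node : Int → BTree → BTree → BTree
deriving DecidableEq

def bInsert : BTree → Int → BTree
  | .leaf, x => .node x .leaf .leaf
  | .node v l r, x => if x ≤ v then .node v (bInsert l x) r else .node v l (bInsert r x)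

def bBuild (xs : List Int) : BTree := xs.foldl bInsert .leaf

def sameBst_alt (nums1 : List Int) (nums2 : List Int) : Bool :=
  bBuild nums1 == bBuild nums2

-- ===== PRECONDITION & SPEC =====
def Spec_sameBst (nums1 : List Int) (nums2 : List Int) (out : Bool) : Prop := out = sameBst_alt nums1 nums2
instance (nums1 : List Int) (nums2 : List Int) (out : Bool) : Decidable (Spec_sameBst nums1 nums2 out) := by unfold Spec_sameBst; infer_instance

-- ===== CLAIM (what is proved, stated in full; the proofs are below) =====
def Claim_equal_sameBst : Prop := ∀ (nums1 : List Int) (nums2 : List Int), Dom_sameBst nums1 nums2 → Spec_sameBst nums1 nums2 (sameBst nums1 nums2)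

-- ===== LEMMAS AND PROOFS =====

def bSize : BTree → Nat
  | .leaf => 0
  | .node _ l r => 1 + bSize l + bSize r

theorem bSize_insert (t : BTree) (x : Int) : bSize (bInsert t x) = bSize t + 1 := by
  induction t with
  | leaf => simp [bInsert, bSize]
  | node v l r ihl ihr =>
    simp only [bInsert]
    split <;> simp [bSize, ihl, ihr] <;> omega

theorem bSize_foldl (xs : List Int) (t : BTree) :
    bSize (xs.foldl bInsert t) = bSize t + xs.length := by
  induction xs generalizing t with
  | nil => simp
  | cons x xs ih => simp [List.foldl, ih, bSize_insert]; omega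

theorem foldl_insert_node (xs : List Int) (v : Int) (l r : BTree) :
    xs.foldl bInsert (.node v l r) =
      .node v ((xs.filter (fun a => a ≤ v)).foldl bInsert l)
             ((xs.filter (fun a => v < a)).foldl bInsert r) := by
  induction xs generalizing l r with
  | nil => simp
  | cons x xs ih =>
    by_cases h : x ≤ v
    · simp [List.foldl, bInsert, h, not_lt.mpr h, ih]
    · simp [List.foldl, bInsert, h, not_le.mp h, ih]

theorem bBuild_cons (x : Int) (xs : List Int) :
    bBuild (x :: xs) =
      .node x (bBuild (xs.filter (fun a => a ≤ x))) (bBuild (xs.filter (fun a => x < a))) := by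
  simp [bBuild, List.foldl, bInsert, foldl_insert_node]

theorem bBuild_cons_ne_leaf (x : Int) (xs : List Int) : bBuild (x :: xs) ≠ .leaf := by
  intro e
  have h := congrArg bSize e
  simp [bBuild, List.foldl, bSize_foldl, bSize_insert, bSize] at h

theorem bBuild_length_eq (l1 l2 : List Int) (h : bBuild l1 = bBuild l2) :
    l1.length = l2.length := by
  have := congrArg bSize h
  simpa [bBuild, bSize_foldl, bSize] using this

theorem sameBst_iff (n : Nat) : ∀ l1 l2 : List Int, l1.length ≤ n →
    (sameBst l1 l2 = true ↔ bBuild l1 = bBuild l2) := by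
  induction n with
  | zero =>
    intro l1 l2 h
    match l1, l2 with
    | [], [] => simp [sameBst]
    | [], y :: ys =>
      simp [sameBst, bBuild]
      intro e
      exact bBuild_cons_ne_leaf y ys (by rw [bBuild, List.foldl]; exact e.symm)
    | x :: xs, _ => simp at h
  | succ n ih =>
    intro l1 l2 h
    match l1, l2 with
    | [], [] => simp [sameBst]
    | [], y :: ys =>
      simp [sameBst, bBuild]
      intro e
      exact bBuild_cons_ne_leaf y ys (by rw [bBuild, List.foldl]; exact e.symm)
    | x :: xs, [] =>
      simp [sameBst, bBuild]
      intro e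
      exact bBuild_cons_ne_leaf x xs (by rw [bBuild, List.foldl]; exact e)
    | x :: xs, y :: ys =>
      rw [sameBst]
      by_cases hlen : xs.length = ys.length
      · by_cases hxy : x = y
        · subst hxy
          have h1 : (xs.filter (fun a => a ≤ x)).length ≤ n :=
            le_trans (List.length_filter_le _ _) (Nat.lt_succ_iff.mp (lt_of_lt_of_le (Nat.lt_succ_self _) h))
          have h2 : (xs.filter (fun a => x < a)).length ≤ n :=
            le_trans (List.length_filter_le _ _) (Nat.lt_succ_iff.mp (lt_of_lt_of_le (Nat.lt_succ_self _) h))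
          simp only [List.isEmpty_cons, Bool.false_and, if_neg Bool.false_ne_true,
            List.length_cons, hlen, ne_eq, not_true_eq_false, if_neg, not_false_eq_true]
          rw [Bool.and_eq_true, ih _ _ h1, ih _ _ h2, bBuild_cons, bBuild_cons]
          constructor
          · rintro ⟨e1, e2⟩; rw [e1, e2]
          · intro e
            injection e with _ e1 e2
            exact ⟨e1, e2⟩
        · simp only [List.isEmpty_cons, Bool.false_and, if_neg Bool.false_ne_true,
            List.length_cons, hlen, ne_eq, not_true_eq_false, if_neg, not_false_eq_true,
            if_pos hxy]
          rw [bBuild_cons, bBuild_cons]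
          constructor
          · intro e; exact absurd e Bool.false_ne_true
          · intro e; injection e with e0; exact absurd e0 hxy
      · have hne : (x :: xs).length ≠ (y :: ys).length := by simp [hlen]
        simp only [List.isEmpty_cons, Bool.false_and, if_neg Bool.false_ne_true, if_pos hne]
        constructor
        · intro e; exact absurd e Bool.false_ne_true
        · intro e; exact absurd (by simpa using bBuild_length_eq _ _ e) hlen

-- ===== VERDICT (by name: the statement is the Claim_ definition above) =====
theorem sameBst_spec : Claim_equal_sameBst := by
  intro l1 l2 _
  unfold Spec_sameBst sameBst_alt
  rw [Bool.eq_iff_iff]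
  simp only [beq_iff_eq]
  exact sameBst_iff l1.length l1 l2 le_rfl
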